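/- GENERATED by farm/mkstatement.py from design/units.tsv (unit `strncmp`) and the Specs of Gif/Spec/*.lean — do not edit.
   THE STATEMENT of the proof unit `strncmp`: the function `strncmp` (42 instructions) satisfies its contract,
   given the contracts of its callees. What the names mean: ProgX/Base/Spec/Basic.lean. The theorem to prove:
   `theorem strncmp_ok : Gif.Spec.strncmp.Statement`. -/
import Gif.Code
import Gif.Dec.All
import Gif.Labels
import Gif.Spec.Driver
namespace Gif.Spec.strncmp
open X86 X86.User Asan

/-- The statement of unit `strncmp`. -/
def Statement : Prop :=
  ∀ (Lay : Layout) (_hLay : Lay.hi = 0x1000000) (μ : Microarch) (_hμ : UserX.MicroOK μ) (u₀ : State)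
    (_hcode : HasCodeNat Lay u₀ Gif.L.strncmp.entry Gif.Code.code_strncmp.nat Gif.L.strncmp.size)
    (_h_asan_load1_noabort : Asan.SmallCheck Lay μ ProgX.Base.WayInv (ProgX.Base.CodeOK u₀) [.rax, .rdx] 1 ProgX.Base.L.__asan_load1_noabort.entry),
    ∀ (others : List Obj) (frames : List (Nat × FrameLayout)), Calls Lay μ ProgX.Base.WayInv (ProgX.Base.conv u₀) Gif.L.strncmp.entry (Gif.Spec.strncmp.spec others frames)

end Gif.Spec.strncmp
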